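-- pv_equiv track=rewrite | github.com/intuitem/ciso-assistant-community | backend/scripts/convert_ccm_v2.py | prettify_content
-- ===== SOURCE A (Python) =====
-- def prettify_content(content) -> str:
--     """Format multi-line cell values similarly to the original helper."""
--     if content is None:
--         return ""
--     res = None
--     stop_join = False
--     for raw_line in str(content).splitlines():
--         line = raw_line.rstrip()
--         if not line:
--             continue
--         res = (
--             f"{res}\n{line}"
--             if stop_join and res
--             else (line if res is None else f"{res} {line}")
--         )
--         if line.endswith(":"):
--             stop_join = True
--     return res or ""
-- ===== SOURCE B (Python) =====
-- def prettify_content(content) -> str: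
--     """Format multi-line cell values: space-join up to and including the first
--     line ending with ':', newline-join the rest."""
--     if content is None:
--         return ""
--     lines = [l.rstrip() for l in str(content).splitlines() if l.rstrip()]
--     k = next((i for i, l in enumerate(lines) if l.endswith(":")), None)
--     if k is None:
--         return " ".join(lines)
--     head = " ".join(lines[:k + 1])
--     tail = lines[k + 1:]
--     return head + "\n" + "\n".join(tail) if tail else head
-- ===== Notes on version B (the rewrite author's own statement) =====
-- stated objective: simpler
-- what changed: Replaces the stateful per-line accumulator (res/stop_join flags threaded through one loop) with a declarative decomposition: build the cleaned line list, find the index of the first colon-ending line, and produce the result with two joins over a slice.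
import Mathlib
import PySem

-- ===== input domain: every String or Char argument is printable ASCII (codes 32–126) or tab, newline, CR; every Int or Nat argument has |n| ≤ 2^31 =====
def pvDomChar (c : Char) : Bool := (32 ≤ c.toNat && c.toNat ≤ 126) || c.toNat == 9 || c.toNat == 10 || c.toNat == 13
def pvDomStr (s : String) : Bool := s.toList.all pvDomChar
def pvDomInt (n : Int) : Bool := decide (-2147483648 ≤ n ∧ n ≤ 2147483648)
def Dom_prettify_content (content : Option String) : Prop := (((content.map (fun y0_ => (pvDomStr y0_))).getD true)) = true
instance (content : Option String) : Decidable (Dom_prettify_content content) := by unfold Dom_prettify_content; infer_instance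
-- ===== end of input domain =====

-- B is a simpler decomposition: clean lines, find first colon-ending line, two joins.

-- ===== PORT A =====
-- A's loop body: rstrip the raw line, skip empties, extend the accumulator
-- (space-separated until a colon line has been seen, then newline-separated).
def pvStep (st : Option (List Char) × Bool) (line : List Char) : Option (List Char) × Bool :=
  let res :=
    match st.1 with
    | none => line
    | some r => if st.2 ∧ r ≠ [] then r ++ '\n' :: line else r ++ ' ' :: line
  (some res, st.2 || PySem.Chars.endswith line [':'])

def pvStepRaw (st : Option (List Char) × Bool) (raw : List Char) : Option (List Char) × Bool :=
  let line := PySem.Chars.rstrip raw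
  if line = [] then st else pvStep st line

def prettify_content (content : Option String) : String :=
  match content with
  | none => ""
  | some s =>
    let st := (PySem.Chars.splitlines s.toList).foldl pvStepRaw (none, false)
    String.ofList (st.1.getD [])

-- ===== PORT B =====
def pvColon (l : List Char) : Bool := PySem.Chars.endswith l [':']

def pvCombine (lines : List (List Char)) : List Char :=
  match lines.findIdx? pvColon with
  | none => PySem.Chars.join [' '] lines
  | some k =>
    let head := PySem.Chars.join [' '] (lines.take (k + 1))
    let tail := lines.drop (k + 1)
    if tail = [] then head else head ++ '\n' :: PySem.Chars.join ['\n'] tail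

def prettify_content_alt (content : Option String) : String :=
  match content with
  | none => ""
  | some s =>
    String.ofList (pvCombine (((PySem.Chars.splitlines s.toList).map PySem.Chars.rstrip).filter
      (fun l => !l.isEmpty)))

-- ===== PRECONDITION & SPEC =====
def Spec_prettify_content (content : Option String) (out : String) : Prop := out = prettify_content_alt content
instance (content : Option String) (out : String) : Decidable (Spec_prettify_content content out) := by unfold Spec_prettify_content; infer_instance

-- ===== CLAIM (what is proved, stated in full; the proofs are below) =====
def Claim_equal_prettify_content : Prop := ∀ (content : Option String), Dom_prettify_content content → Spec_prettify_content content (prettify_content content)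

-- ===== LEMMAS AND PROOFS =====

theorem pvClean (raws : List (List Char)) (st : Option (List Char) × Bool) :
    raws.foldl pvStepRaw st
      = ((raws.map PySem.Chars.rstrip).filter (fun l => !l.isEmpty)).foldl pvStep st := by
  induction raws generalizing st with
  | nil => rfl
  | cons raw t ih =>
    simp only [List.foldl_cons, List.map_cons, List.filter_cons, pvStepRaw]
    by_cases h : PySem.Chars.rstrip raw = []
    · simp [h, ih]
    · simp [h, ih]

theorem pvSingletonSuffix {a : Char} {s : List Char} : [a] <:+ s ↔ s.getLast? = some a := by
  constructor
  · rintro ⟨t, rfl⟩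
    simp
  · intro h
    have hne : s ≠ [] := by rintro rfl; simp at h
    refine ⟨s.dropLast, ?_⟩
    have hd := List.dropLast_append_getLast hne
    rw [List.getLast?_eq_some_getLast hne] at h
    simpa [Option.some_inj.mp h.symm] using hd

theorem pvColon_append (r : List Char) (c : Char) {l : List Char} (hl : l ≠ []) :
    pvColon (r ++ c :: l) = pvColon l := by
  have h1 : pvColon (r ++ c :: l) = true ↔ pvColon l = true := by
    unfold pvColon
    rw [PySem.Chars.endswith_iff, PySem.Chars.endswith_iff,
      pvSingletonSuffix, pvSingletonSuffix,
      show r ++ c :: l = (r ++ [c]) ++ l by simp,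
      List.getLast?_append_of_ne_nil _ hl]
  cases hb : pvColon l
  · cases hx : pvColon (r ++ c :: l)
    · rfl
    · exact absurd (h1.mp hx) (by simp [hb])
  · exact h1.mpr hb

theorem pvJoinMerge (sep : Char) (a b : List Char) (t : List (List Char)) :
    PySem.Chars.join [sep] ((a ++ sep :: b) :: t) = PySem.Chars.join [sep] (a :: b :: t) := by
  cases t with
  | nil => simp [PySem.Chars.join_cons_cons, PySem.Chars.join_singleton]
  | cons c t' => simp [PySem.Chars.join_cons_cons]

theorem pvStopRun (t : List (List Char)) : ∀ r : List Char, r ≠ [] →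
    (t.foldl pvStep (some r, true)).1 = some (PySem.Chars.join ['\n'] (r :: t)) := by
  induction t with
  | nil => intro r _; simp [PySem.Chars.join_singleton]
  | cons l t' ih =>
    intro r hr
    have hstep : pvStep (some r, true) l = (some (r ++ '\n' :: l), true) := by
      simp [pvStep, hr]
    rw [List.foldl_cons, hstep, ih (r ++ '\n' :: l) (by simp), pvJoinMerge]

theorem pvMergeCombine {r l : List Char} (t : List (List Char))
    (hr : pvColon r = false) (hl : pvColon l = false) (hln : l ≠ []) :
    pvCombine ((r ++ ' ' :: l) :: t) = pvCombine (r :: l :: t) := by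
  have hm : pvColon (r ++ ' ' :: l) = false := by rw [pvColon_append r ' ' hln]; exact hl
  unfold pvCombine
  rw [List.findIdx?_cons, List.findIdx?_cons, List.findIdx?_cons, hm, hr, hl]
  cases hf : List.findIdx? pvColon t with
  | none => simp [pvJoinMerge]
  | some k => simp [pvJoinMerge]

theorem pvRunRun (t : List (List Char)) : ∀ r : List Char, r ≠ [] →
    (∀ l ∈ t, l ≠ []) → pvColon r = false →
    (t.foldl pvStep (some r, false)).1 = some (pvCombine (r :: t)) := by
  induction t with
  | nil =>
    intro r _ _ hr
    simp [pvCombine, List.findIdx?_cons, hr, PySem.Chars.join_singleton]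
  | cons l t' ih =>
    intro r hrne hne hr
    have hstep : pvStep (some r, false) l = (some (r ++ ' ' :: l), pvColon l) := by
      simp [pvStep, pvColon]
    rw [List.foldl_cons, hstep]
    have hlne : l ≠ [] := hne l (by simp)
    cases hc : pvColon l with
    | true =>
      rw [pvStopRun t' (r ++ ' ' :: l) (by simp)]
      cases t' with
      | nil =>
        simp [pvCombine, List.findIdx?_cons, hr, hc, PySem.Chars.join_singleton,
          PySem.Chars.join_cons_cons]
      | cons c t'' =>
        simp [pvCombine, List.findIdx?_cons, hr, hc, PySem.Chars.join_singleton,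
          PySem.Chars.join_cons_cons]
    | false =>
      rw [ih (r ++ ' ' :: l) (by simp) (fun x hx => hne x (by simp [hx]))
        (by rw [pvColon_append r ' ' hlne]; exact hc)]
      rw [pvMergeCombine t' hr hc hlne]

theorem pvCombineMain (L : List (List Char)) (hne : ∀ l ∈ L, l ≠ []) :
    (L.foldl pvStep (none, false)).1.getD [] = pvCombine L := by
  cases L with
  | nil => simp [pvCombine, PySem.Chars.join_nil]
  | cons l t =>
    have hlne : l ≠ [] := hne l (by simp)
    have hstep : pvStep (none, false) l = (some l, pvColon l) := by
      simp [pvStep, pvColon]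
    rw [List.foldl_cons, hstep]
    cases hc : pvColon l with
    | true =>
      rw [pvStopRun t l hlne]
      cases t with
      | nil =>
        simp [pvCombine, List.findIdx?_cons, hc, PySem.Chars.join_singleton]
      | cons c t' =>
        simp [pvCombine, List.findIdx?_cons, hc, PySem.Chars.join_singleton,
          PySem.Chars.join_cons_cons]
    | false =>
      rw [pvRunRun t l hlne (fun x hx => hne x (by simp [hx])) hc]
      rfl

-- ===== VERDICT (by name: the statement is the Claim_ definition above) =====
theorem prettify_content_spec : Claim_equal_prettify_content := by
  intro content _
  unfold Spec_prettify_content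
  cases content with
  | none => rfl
  | some s =>
    simp only [prettify_content, prettify_content_alt, pvClean]
    congr 1
    exact pvCombineMain _ (by
      intro l hl
      have := List.mem_filter.mp hl
      simpa [List.isEmpty_iff] using this.2)
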